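-- pv_equiv track=rewrite | github.com/RXhy/strukdat | praPrak.py | CountHeight
-- ===== SOURCE A (Python) =====
-- def CountHeight(tree:dict, parent):
--     if tree.get(parent) == None or parent not in tree.keys():
--         return 1
--     max_child_height = 0
--     for child in tree[parent]:
--         child_height = CountHeight(tree,child)
--         max_child_height = max(max_child_height,child_height)
--     return 1 + max_child_height
-- ===== SOURCE B (Python) =====
-- def CountHeight(tree: dict, parent):
--     height = 0
--     frontier = [parent]
--     while frontier:
--         height += 1
--         nxt = []
--         for node in frontier:
--             children = tree.get(node)
--             if children is not None:
--                 nxt += children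
--         frontier = nxt
--     return height
-- ===== Notes on version B (the rewrite author's own statement) =====
-- stated objective: alternative
-- what changed: Replaces the recursive DFS (max over child heights) by an iterative level-order traversal that counts non-empty frontiers, with no recursion and no per-node max computation.
import Mathlib
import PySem

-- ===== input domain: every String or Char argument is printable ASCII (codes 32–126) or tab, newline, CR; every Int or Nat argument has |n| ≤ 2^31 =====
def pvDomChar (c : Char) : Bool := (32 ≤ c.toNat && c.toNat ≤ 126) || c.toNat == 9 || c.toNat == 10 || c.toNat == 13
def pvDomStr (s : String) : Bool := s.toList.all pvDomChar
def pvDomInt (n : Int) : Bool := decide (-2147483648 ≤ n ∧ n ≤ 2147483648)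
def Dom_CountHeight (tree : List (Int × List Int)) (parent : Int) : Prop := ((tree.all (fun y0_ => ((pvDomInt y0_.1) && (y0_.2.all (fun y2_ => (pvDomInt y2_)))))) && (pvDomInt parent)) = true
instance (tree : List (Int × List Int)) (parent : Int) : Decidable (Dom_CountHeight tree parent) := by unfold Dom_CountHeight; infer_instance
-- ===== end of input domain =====

-- B replaces A's recursive DFS height by an iterative level-order (BFS) count of
-- non-empty frontiers; the equivalence below is about the return value on acyclic inputs.

-- ===== PORT A =====
-- dict lookup (first match = Python dict lookup for the nodup-keyed lists a dict yields)
def pvGet (tree : List (Int × List Int)) (k : Int) : Option (List Int) :=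
  List.lookup k tree

-- A's recursion, made total with fuel; under Pre_CountHeight (no reachable path of
-- tree.length+1 edges) the fuel tree.length+1 is never exhausted, so this is exactly
-- A's recursion: leaf test 'tree.get(parent) == None or parent not in tree.keys()'
-- (both disjuncts = lookup fails, values are lists), then the max-accumulator loop.
def CountHeightFuel (tree : List (Int × List Int)) : Nat → Int → Int
  | 0, _ => 1
  | f + 1, parent =>
    match pvGet tree parent with
    | none => 1
    | some children =>
      1 + children.foldl (fun max_child_height child =>
            max max_child_height (CountHeightFuel tree f child)) 0

def CountHeight (tree : List (Int × List Int)) (parent : Int) : Int :=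
  CountHeightFuel tree (tree.length + 1) parent

-- ===== PORT B =====
-- one 'for node in frontier' pass: nxt += tree.get(node) when present
def pvNextFrontier (tree : List (Int × List Int)) (frontier : List Int) : List Int :=
  frontier.foldl (fun nxt node =>
    match pvGet tree node with
    | none => nxt
    | some children => nxt ++ children) []

-- the while loop, with the same fuel bound (never exhausted under Pre_CountHeight)
def bfsLoop (tree : List (Int × List Int)) : Nat → List Int → Int → Int
  | 0, _, height => height
  | f + 1, frontier, height =>
    if frontier = [] then height
    else bfsLoop tree f (pvNextFrontier tree frontier) (height + 1)

def CountHeight_alt (tree : List (Int × List Int)) (parent : Int) : Int :=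
  bfsLoop tree (tree.length + 1) [parent] 0

-- ===== PRECONDITION & SPEC =====
-- longPath tree p n = true iff some path of n edges starts at p
def longPath (tree : List (Int × List Int)) (p : Int) : Nat → Bool
  | 0 => true
  | n + 1 =>
    match pvGet tree p with
    | none => false
    | some children => children.any (fun c => longPath tree c n)

-- Pre_ excludes exactly the inputs with a path of tree.length+1 edges from parent,
-- i.e. a cycle reachable from parent, on which Python A raises RecursionError
-- (and B loops forever); on acyclic inputs every path has ≤ tree.length edges.
def Pre_CountHeight (tree : List (Int × List Int)) (parent : Int) : Prop :=
  longPath tree parent (tree.length + 1) = false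
instance (tree : List (Int × List Int)) (parent : Int) : Decidable (Pre_CountHeight tree parent) := by unfold Pre_CountHeight; infer_instance

def pvWitness_CountHeight : (List (Int × List Int)) × Int :=
  ([(1, [2, 3]), (2, [4]), (3, [])], 1)

def Spec_CountHeight (tree : List (Int × List Int)) (parent : Int) (out : Int) : Prop := out = CountHeight_alt tree parent
instance (tree : List (Int × List Int)) (parent : Int) (out : Int) : Decidable (Spec_CountHeight tree parent out) := by unfold Spec_CountHeight; infer_instance

-- ===== CLAIM (what is proved, stated in full; the proofs are below) =====
def Claim_equal_CountHeight : Prop := ∀ (tree : List (Int × List Int)) (parent : Int), Dom_CountHeight tree parent → Pre_CountHeight tree parent → Spec_CountHeight tree parent (CountHeight tree parent)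

-- ===== LEMMAS AND PROOFS =====

-- every height is ≥ 1 (fuel-0 included)
lemma CHF_one_le (tree : List (Int × List Int)) : ∀ (f : Nat) (p : Int),
    1 ≤ CountHeightFuel tree f p := by
  intro f p
  cases f with
  | zero => simp [CountHeightFuel]
  | succ f =>
    unfold CountHeightFuel
    cases h : pvGet tree p with
    | none => simp
    | some cs =>
      simp only
      have : ∀ (l : List Int) (a : Int), a ≤ l.foldl
          (fun m c => max m (CountHeightFuel tree f c)) a := by
        intro l
        induction l with
        | nil => intro a; simp
        | cons x l ih =>
          intro a
          exact le_trans (le_max_left a _) (ih (max a _))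
      have h0 := this cs 0
      omega

lemma foldl_max_shift : ∀ (l : List Int) (a b : Int),
    List.foldl max (max a b) l = max a (List.foldl max b l) := by
  intro l
  induction l with
  | nil => intro a b; rfl
  | cons x l ih =>
    intro a b
    simp only [List.foldl_cons, max_assoc, ih]

lemma foldl_max_nonneg (l : List Int) : 0 ≤ List.foldl max 0 l := by
  have h := foldl_max_shift l 0 0
  simp at h
  omega

lemma foldl_max_append (A B : List Int) :
    List.foldl max 0 (A ++ B) = max (List.foldl max 0 A) (List.foldl max 0 B) := by
  rw [List.foldl_append]
  have h := foldl_max_shift B (List.foldl max 0 A) 0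
  rw [max_eq_left (foldl_max_nonneg A)] at h
  exact h

-- children list used by the functional view of one BFS step
def pvCh (tree : List (Int × List Int)) (p : Int) : List Int :=
  match pvGet tree p with
  | none => []
  | some cs => cs

lemma nextFrontier_eq_flatMap (tree : List (Int × List Int)) (F : List Int) :
    pvNextFrontier tree F = F.flatMap (pvCh tree) := by
  unfold pvNextFrontier
  have h : ∀ G, F.foldl (fun nxt node =>
      match pvGet tree node with
      | none => nxt
      | some children => nxt ++ children) G = G ++ F.flatMap (pvCh tree) := by
    induction F with
    | nil => intro G; simp
    | cons x F ih =>
      intro G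
      simp only [List.foldl_cons, List.flatMap_cons]
      cases h : pvGet tree x with
      | none => rw [ih]; simp [pvCh, h]
      | some cs => rw [ih]; simp [pvCh, h, List.append_assoc]
  simpa using h []

-- unfolding one level of A's recursion into "1 + max over the children list"
lemma CHF_succ (tree : List (Int × List Int)) (f : Nat) (p : Int) :
    CountHeightFuel tree (f + 1) p
      = 1 + List.foldl max 0 ((pvCh tree p).map (CountHeightFuel tree f)) := by
  unfold CountHeightFuel pvCh
  cases h : pvGet tree p with
  | none => simp
  | some cs => simp [List.foldl_map]

-- one BFS step: the max height over a non-empty frontier at fuel f+1 is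
-- 1 + the max height over the next frontier at fuel f
lemma step_eq (tree : List (Int × List Int)) (f : Nat) :
    ∀ (F : List Int), F ≠ [] →
      List.foldl max 0 (F.map (CountHeightFuel tree (f + 1)))
        = 1 + List.foldl max 0 ((F.flatMap (pvCh tree)).map (CountHeightFuel tree f)) := by
  intro F
  induction F with
  | nil => intro h; exact absurd rfl h
  | cons p F ih =>
    intro _
    simp only [List.map_cons, List.flatMap_cons, List.map_append]
    rw [List.foldl_cons, foldl_max_append]
    have hp1 := CHF_one_le tree (f + 1) p
    have hshift : List.foldl max (max 0 (CountHeightFuel tree (f+1) p)) (F.map (CountHeightFuel tree (f+1)))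
        = max (CountHeightFuel tree (f+1) p) (List.foldl max 0 (F.map (CountHeightFuel tree (f+1)))) := by
      rw [max_comm 0 _, foldl_max_shift]
    rw [hshift]
    cases F with
    | nil =>
      simp only [List.map_nil, List.foldl_nil, List.flatMap_nil]
      rw [CHF_succ]
      have := foldl_max_nonneg ((pvCh tree p).map (CountHeightFuel tree f))
      omega
    | cons q F' =>
      rw [ih (by simp)]
      rw [CHF_succ]
      have h1 := foldl_max_nonneg ((pvCh tree p).map (CountHeightFuel tree f))
      have h2 := foldl_max_nonneg (((q :: F').flatMap (pvCh tree)).map (CountHeightFuel tree f))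
      omega

-- all children of a frontier with no f+1-edge paths have no f-edge paths
lemma longPath_children (tree : List (Int × List Int)) (f : Nat) (F : List Int)
    (h : ∀ p ∈ F, longPath tree p (f + 1) = false) :
    ∀ c ∈ F.flatMap (pvCh tree), longPath tree c f = false := by
  intro c hc
  rcases List.mem_flatMap.1 hc with ⟨p, hp, hcp⟩
  have := h p hp
  unfold longPath at this
  unfold pvCh at hcp
  cases hg : pvGet tree p with
  | none => rw [hg] at hcp; simp at hcp
  | some cs =>
    rw [hg] at this hcp
    simp only [List.any_eq_false] at this
    simpa using this c hcp

-- the BFS loop computes the max of A's heights over the frontier (same fuel both sides)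
lemma bfs_eq (tree : List (Int × List Int)) :
    ∀ (f : Nat) (F : List Int), (∀ p ∈ F, longPath tree p f = false) →
      ∀ (g : Nat), f ≤ g → ∀ (h : Int),
        bfsLoop tree g F h = h + List.foldl max 0 (F.map (CountHeightFuel tree f)) := by
  intro f
  induction f with
  | zero =>
    intro F hF g _ h
    have hFnil : F = [] := by
      cases F with
      | nil => rfl
      | cons p F => exact absurd (hF p (by simp)) (by simp [longPath])
    subst hFnil
    cases g <;> simp [bfsLoop]
  | succ f ih =>
    intro F hF g hg h
    cases g with
    | zero => omega
    | succ g' =>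
      by_cases hF0 : F = []
      · subst hF0; simp [bfsLoop]
      · unfold bfsLoop
        rw [if_neg hF0]
        rw [nextFrontier_eq_flatMap]
        rw [ih (F.flatMap (pvCh tree)) (longPath_children tree f F hF) g' (by omega)]
        rw [step_eq tree f F hF0]
        omega

-- ===== VERDICT (by name: the statement is the Claim_ definition above) =====
theorem CountHeight_spec : Claim_equal_CountHeight := by
  intro tree parent _ hpre
  unfold Spec_CountHeight CountHeight CountHeight_alt
  rw [bfs_eq tree (tree.length + 1) [parent] (by intro p hp; simp at hp; subst hp; exact hpre)
        (tree.length + 1) le_rfl 0]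
  have h1 := CHF_one_le tree (tree.length + 1) parent
  simp only [List.map_cons, List.map_nil, List.foldl_cons, List.foldl_nil]
  omega
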